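-- pv_equiv track=rewrite | github.com/totoLab/code-ingegneria-informatica | fondamenti1/simulazioni_esame/08022022/es3.py | genera_filiali_prezzo
-- ===== SOURCE A (Python) =====
-- def genera_filiali_prezzo(M):
--     filiali_prezzo = {}
--     for ordine in range(len(M)):
--         filiale = M[ordine][0]
--         prezzo = M[ordine][2]
--         if filiale not in filiali_prezzo:
--             filiali_prezzo[filiale] = 0
--         filiali_prezzo[filiale] += prezzo
--
--     return filiali_prezzo
--
-- M = [
--     ["Filiale A", 10, 5, 8],
--     ["Filiale B", 12, 10, 12],
--     ["Filiale C", 6, 5, 4],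
--     ["Filiale D", 4, 5, 4],
--     ["Filiale E", 8, 10, 7],
--     ["Filiale F", 6, 15, 5],
--     ["Filiale A", 10, 10, 9],
--     ["Filiale B", 11, 5, 11],
--     ["Filiale C", 6, 5, 5],
--     ["Filiale D", 11, 10, 10],
-- ]
-- ===== SOURCE B (Python) =====
-- def genera_filiali_prezzo(M):
--     branches = dict.fromkeys(row[0] for row in M)
--     return {f: sum(row[2] for row in M if row[0] == f) for f in branches}
-- ===== Notes on version B (the rewrite author's own statement) =====
-- stated objective: alternative
-- what changed: Replaces the single incremental dict-accumulation loop by a two-pass scheme: first collect the distinct branch names in first-occurrence order (dict.fromkeys), then compute each branch's total with a separate sum over the rows, trading the O(n) accumulator for an O(n*k) comprehension of independent sums.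
import Mathlib
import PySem

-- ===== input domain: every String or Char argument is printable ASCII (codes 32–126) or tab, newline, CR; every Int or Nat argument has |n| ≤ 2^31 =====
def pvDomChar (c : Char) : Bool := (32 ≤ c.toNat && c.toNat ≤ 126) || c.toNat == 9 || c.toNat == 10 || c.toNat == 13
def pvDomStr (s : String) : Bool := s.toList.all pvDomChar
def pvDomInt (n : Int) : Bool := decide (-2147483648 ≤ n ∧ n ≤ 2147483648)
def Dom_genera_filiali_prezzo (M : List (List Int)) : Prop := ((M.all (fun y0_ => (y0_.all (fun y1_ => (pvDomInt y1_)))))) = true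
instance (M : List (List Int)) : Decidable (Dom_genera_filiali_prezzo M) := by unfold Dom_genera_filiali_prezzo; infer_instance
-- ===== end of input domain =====

-- B sums each branch independently in a second pass over the rows instead of accumulating in one pass; alternative decomposition, not faster.

-- ===== PORT A =====
-- A: single pass over range(len(M)), accumulating per-branch totals in a dict.
def genera_filiali_prezzo (M : List (List Int)) : List (Int × Int) :=
  ((PySem.List.pyRange 0 (M.length : Int) 1).foldl
    (fun (d : PySem.Dict Int Int) ordine =>
      let ord := PySem.List.pyGetD M ordine []
      let filiale := PySem.List.pyGetD ord 0 0
      let prezzo := PySem.List.pyGetD ord 2 0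
      let d1 := if d.contains filiale then d else d.insert filiale 0
      d1.modify filiale 0 (· + prezzo))
    PySem.Dict.empty).items

-- ===== PORT B =====
-- B: distinct branch names in first-occurrence order, then one independent sum per branch.
def genera_filiali_prezzo_alt (M : List (List Int)) : List (Int × Int) :=
  (PySem.List.dedup (M.map (fun row => PySem.List.pyGetD row 0 0))).map
    (fun f => (f, ((M.filter (fun row => PySem.List.pyGetD row 0 0 == f)).map
        (fun row => PySem.List.pyGetD row 2 0)).sum))

-- ===== PRECONDITION & SPEC =====
-- Pre_ excludes only inputs on which A raises IndexError: a row shorter than 3 elements.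
def Pre_genera_filiali_prezzo (M : List (List Int)) : Prop :=
  ∀ r ∈ M, 3 ≤ r.length
instance (M : List (List Int)) : Decidable (Pre_genera_filiali_prezzo M) := by
  unfold Pre_genera_filiali_prezzo; infer_instance

def pvWitness_genera_filiali_prezzo : List (List Int) := [[1, 2, 3], [1, 0, 4], [2, 0, 5]]

def Spec_genera_filiali_prezzo (M : List (List Int)) (out : List (Int × Int)) : Prop := out = genera_filiali_prezzo_alt M
instance (M : List (List Int)) (out : List (Int × Int)) : Decidable (Spec_genera_filiali_prezzo M out) := by unfold Spec_genera_filiali_prezzo; infer_instance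

-- ===== CLAIM (what is proved, stated in full; the proofs are below) =====
def Claim_equal_genera_filiali_prezzo : Prop := ∀ (M : List (List Int)), Dom_genera_filiali_prezzo M → Pre_genera_filiali_prezzo M → Spec_genera_filiali_prezzo M (genera_filiali_prezzo M)

-- ===== LEMMAS AND PROOFS =====

-- A's loop body (setdefault-then-add) is extensionally a plain `modify` step.
theorem pv_step_eq (d : PySem.Dict Int Int) (f p : Int) :
    (if d.contains f then d else d.insert f 0).modify f 0 (· + p) = d.modify f 0 (· + p) := by
  by_cases h : d.contains f
  · simp [h]
  · simp only [h, Bool.false_eq_true, if_false]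
    have hnf : ∀ q ∈ d.items, q.1 ≠ f := by
      intro q hq hqf
      have hm : f ∈ d.keys := by
        simp only [PySem.Dict.keys]
        exact List.mem_map.mpr ⟨q, hq, hqf⟩
      rw [← PySem.Dict.contains_iff_mem_keys] at hm
      simp [h] at hm
    apply PySem.Dict.ext
    simp [PySem.Dict.modify, PySem.Dict.insert, h]
    have hg : PySem.Dict.getD { items := d.items ++ [(f, 0)] } f 0 = 0 := by
      have := PySem.Dict.getD_insert_self d f 0 0
      simpa [PySem.Dict.insert, h] using this
    rw [hg]
    constructor
    · rw [List.map_congr_left, List.map_id]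
      intro q hq
      simp [hnf q hq]
    · have h2 : d.getD f 0 = 0 := by
        rw [PySem.Dict.getD_eq_get?_getD]
        have : d.get? f = none := by
          rw [PySem.Dict.get?_eq_none_iff_contains]; simpa using h
        simp [this]
      omega

-- Invariant of the accumulation loop: the total stored under f is the old value plus the sum of f's prices.
theorem pv_getD_fold (M : List (List Int)) (d : PySem.Dict Int Int) (f : Int) :
    (M.foldl (fun d r => d.modify (PySem.List.pyGetD r 0 0) 0 (· + PySem.List.pyGetD r 2 0)) d).getD f 0
      = d.getD f 0 + ((M.filter (fun r => PySem.List.pyGetD r 0 0 == f)).map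
          (fun r => PySem.List.pyGetD r 2 0)).sum := by
  induction M generalizing d with
  | nil => simp
  | cons r t ih =>
    simp only [List.foldl_cons, List.filter_cons]
    rw [ih]
    by_cases hk : PySem.List.pyGetD r 0 0 = f
    · simp [hk, PySem.Dict.getD_modify_self]
      ring
    · rw [PySem.Dict.getD_modify_of_ne]
      · simp [hk]
      · exact fun h => hk h.symm

-- ===== VERDICT (by name: the statement is the Claim_ definition above) =====
theorem genera_filiali_prezzo_spec : Claim_equal_genera_filiali_prezzo := by
  intro M _ _
  unfold Spec_genera_filiali_prezzo genera_filiali_prezzo genera_filiali_prezzo_alt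
  rw [PySem.List.foldl_pyRange_zero_pyGetD' M ([] : List Int)
      (fun (d : PySem.Dict Int Int) ord =>
        (if d.contains (PySem.List.pyGetD ord 0 0) then d
         else d.insert (PySem.List.pyGetD ord 0 0) 0).modify (PySem.List.pyGetD ord 0 0) 0
          (· + PySem.List.pyGetD ord 2 0)) PySem.Dict.empty]
  have hstep : (M.foldl
      (fun (d : PySem.Dict Int Int) ord =>
        (if d.contains (PySem.List.pyGetD ord 0 0) then d
         else d.insert (PySem.List.pyGetD ord 0 0) 0).modify (PySem.List.pyGetD ord 0 0) 0
          (· + PySem.List.pyGetD ord 2 0)) PySem.Dict.empty)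
      = (M.foldl (fun d r => d.modify (PySem.List.pyGetD r 0 0) 0 (· + PySem.List.pyGetD r 2 0))
          PySem.Dict.empty) := by
    congr 1
    funext d r
    exact pv_step_eq d (PySem.List.pyGetD r 0 0) (PySem.List.pyGetD r 2 0)
  rw [hstep]
  have hnd : (M.foldl (fun d r => d.modify (PySem.List.pyGetD r 0 0) 0 (· + PySem.List.pyGetD r 2 0))
      PySem.Dict.empty).keys.Nodup :=
    PySem.Dict.nodup_keys_foldl_modify_key M (fun r => PySem.List.pyGetD r 0 0) 0
      (fun d r => (· + PySem.List.pyGetD r 2 0)) PySem.Dict.empty PySem.Dict.nodup_keys_empty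
  rw [PySem.Dict.items_eq_map_keys _ hnd 0]
  rw [PySem.Dict.keys_foldl_modify_key]
  have hkeys : PySem.Set.update (PySem.Dict.empty : PySem.Dict Int Int).keys
      (M.map (fun r => PySem.List.pyGetD r 0 0))
      = PySem.List.dedup (M.map (fun r => PySem.List.pyGetD r 0 0)) := by
    rw [PySem.List.dedup_eq_ofList]
    rfl
  rw [hkeys]
  apply List.map_congr_left
  intro k _
  rw [pv_getD_fold]
  simp
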